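-- pv_equiv track=rewrite | github.com/stebach/AdventOfCode | years/2022/day03/solve_2022_03.py | badge_priority
-- ===== SOURCE A (Python) =====
-- def badge_priority(data):
--     items = []
--     for x in range(0, len(data), 3):
--         set1 = set([*data[x][0], *data[x][1]])
--         set2 = set([*data[x + 1][0], *data[x + 1][1]])
--         set3 = set([*data[x + 2][0], *data[x + 2][1]])
--         intersection = [x for x in set1 if x in set2 and x in set3]
--         for item in intersection:
--             items.append(item)
--     return sum(items)
-- ===== SOURCE B (Python) =====
-- def badge_priority(data):
--     total = 0
--     for i in range(0, len(data), 3):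
--         counts = {}
--         for line in (data[i], data[i + 1], data[i + 2]):
--             for item in set(line[0] + line[1]):
--                 counts[item] = counts.get(item, 0) + 1
--         total += sum(item for item, c in counts.items() if c == 3)
--     return total
-- ===== Notes on version B (the rewrite author's own statement) =====
-- stated objective: alternative
-- what changed: B replaces A's nested membership tests (for each item of set1, test membership in set2 and set3) by a single occurrence count over the three per-line sets of each group, summing the items whose count equals 3.
import Mathlib
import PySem

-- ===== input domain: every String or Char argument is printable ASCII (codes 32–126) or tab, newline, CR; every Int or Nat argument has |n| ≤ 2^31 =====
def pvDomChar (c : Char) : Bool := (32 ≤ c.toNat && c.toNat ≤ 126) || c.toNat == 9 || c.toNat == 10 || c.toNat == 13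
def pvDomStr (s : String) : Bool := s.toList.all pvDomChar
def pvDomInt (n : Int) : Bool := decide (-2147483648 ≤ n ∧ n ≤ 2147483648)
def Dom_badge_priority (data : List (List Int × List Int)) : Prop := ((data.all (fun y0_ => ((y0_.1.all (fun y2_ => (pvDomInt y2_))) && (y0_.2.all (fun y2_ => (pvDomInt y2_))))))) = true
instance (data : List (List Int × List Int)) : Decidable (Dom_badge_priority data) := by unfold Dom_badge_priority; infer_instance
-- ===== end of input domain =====

-- B replaces A's nested membership tests (x in set2 and x in set3) by one occurrence count
-- over the three per-line sets of each group, selecting the items counted 3 times (objective: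
-- alternative decomposition, same asymptotic cost).

-- ===== PORT A =====
-- data[x] etc. are ported with pyGetD and a junk default; Pre_ excludes exactly the inputs
-- (len(data) not a multiple of 3) on which the Python A hits an IndexError there.
def badge_priority (data : List (List Int × List Int)) : Int :=
  let items : List Int :=
    (PySem.List.pyRange 0 (PySem.List.len data) 3).foldl (fun items x =>
      let r1 := PySem.List.pyGetD data x ([], [])
      let r2 := PySem.List.pyGetD data (x + 1) ([], [])
      let r3 := PySem.List.pyGetD data (x + 2) ([], [])
      let set1 : PySem.Set Int := PySem.Set.ofList (r1.1 ++ r1.2)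
      let set2 : PySem.Set Int := PySem.Set.ofList (r2.1 ++ r2.2)
      let set3 : PySem.Set Int := PySem.Set.ofList (r3.1 ++ r3.2)
      -- [x for x in set1 if x in set2 and x in set3]; consumed only by sum, order-independent
      let intersection := set1.filter (fun y => PySem.Set.contains set2 y && PySem.Set.contains set3 y)
      items ++ intersection) []
  items.sum

-- ===== PORT B =====
-- counts[item] = counts.get(item, 0) + 1 is Dict.modify item 0 (· + 1) (overwrite keeps
-- position, new keys append); the final generator sum is order-independent. data[i] etc. are
-- ported with pyGetD and a junk default; Pre_ excludes exactly the IndexError inputs.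
def badge_priority_alt (data : List (List Int × List Int)) : Int :=
  (PySem.List.pyRange 0 (PySem.List.len data) 3).foldl (fun total i =>
    let group := [PySem.List.pyGetD data i ([], []), PySem.List.pyGetD data (i + 1) ([], []),
                  PySem.List.pyGetD data (i + 2) ([], [])]
    let counts : PySem.Dict Int Int :=
      group.foldl (fun d line =>
        (PySem.Set.ofList (line.1 ++ line.2)).foldl (fun d item => d.modify item 0 (· + 1)) d)
        PySem.Dict.empty
    total + ((counts.items.filter (fun p => p.2 == 3)).map (·.1)).sum) 0

-- ===== PRECONDITION & SPEC =====
-- Python A raises IndexError at data[x+1] or data[x+2] whenever len(data) is not a multiple of 3.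
def Pre_badge_priority (data : List (List Int × List Int)) : Prop := data.length % 3 = 0
instance (data : List (List Int × List Int)) : Decidable (Pre_badge_priority data) := by unfold Pre_badge_priority; infer_instance
def pvWitness_badge_priority : (List (List Int × List Int)) := [([1], [2]), ([1], [3]), ([1], [4])]

def Spec_badge_priority (data : List (List Int × List Int)) (out : Int) : Prop := out = badge_priority_alt data
instance (data : List (List Int × List Int)) (out : Int) : Decidable (Spec_badge_priority data out) := by unfold Spec_badge_priority; infer_instance

-- ===== CLAIM (what is proved, stated in full; the proofs are below) =====
def Claim_equal_badge_priority : Prop := ∀ (data : List (List Int × List Int)), Dom_badge_priority data → Pre_badge_priority data → Spec_badge_priority data (badge_priority data)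

-- ===== LEMMAS AND PROOFS =====

-- the list A appends for one group, as a function of the three rows
def groupA (a b c : List Int × List Int) : List Int :=
  (PySem.Set.ofList (a.1 ++ a.2)).filter (fun y =>
    PySem.Set.contains (PySem.Set.ofList (b.1 ++ b.2)) y &&
    PySem.Set.contains (PySem.Set.ofList (c.1 ++ c.2)) y)

-- the summand B adds for one full group
def groupB (g : List (List Int × List Int)) : Int :=
  (((g.foldl (fun d line =>
      (PySem.Set.ofList (line.1 ++ line.2)).foldl (fun d item => d.modify item 0 (· + 1)) d)
      (PySem.Dict.empty : PySem.Dict Int Int)).items.filter (fun p => p.2 == 3)).map (·.1)).sum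

lemma count_set_mem (l : List Int) (y : Int) :
    (PySem.Set.ofList l).count y = if y ∈ l then 1 else 0 := by
  by_cases h : y ∈ l
  · rw [if_pos h]
    exact List.count_eq_one_of_mem (PySem.Set.nodup_ofList l) ((PySem.Set.mem_ofList l y).2 h)
  · rw [if_neg h]
    exact List.count_eq_zero.2 (fun hm => h ((PySem.Set.mem_ofList l y).1 hm))

lemma group_eq (a b c : List Int × List Int) : (groupA a b c).sum = groupB [a, b, c] := by
  unfold groupA groupB
  have hc : ([a, b, c].foldl (fun d line =>
      (PySem.Set.ofList (line.1 ++ line.2)).foldl (fun d item => d.modify item 0 (· + 1)) d)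
      (PySem.Dict.empty : PySem.Dict Int Int))
      = PySem.Dict.counter (PySem.Set.ofList (a.1 ++ a.2) ++ (PySem.Set.ofList (b.1 ++ b.2) ++ PySem.Set.ofList (c.1 ++ c.2))) := by
    rw [PySem.Dict.counter_eq_foldl, List.foldl_append, List.foldl_append]
    rfl
  rw [hc, PySem.Dict.items_counter, List.filter_map, List.map_map]
  have hmap : ((fun x => x.1) ∘ (fun k => (k, (List.count k (PySem.Set.ofList (a.1 ++ a.2) ++ (PySem.Set.ofList (b.1 ++ b.2) ++ PySem.Set.ofList (c.1 ++ c.2))) : Int)))) = (id : Int → Int) := rfl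
  rw [hmap, List.map_id]
  apply List.Perm.sum_eq
  apply List.perm_of_nodup_nodup_toFinset_eq
    (List.Nodup.filter _ (PySem.Set.nodup_ofList _))
    (List.Nodup.filter _ (PySem.Set.nodup_ofList _))
  ext y
  have hcnt : ∀ k : Int, List.count k (PySem.Set.ofList (a.1 ++ a.2) ++ (PySem.Set.ofList (b.1 ++ b.2) ++ PySem.Set.ofList (c.1 ++ c.2))) = (if k ∈ a.1 ++ a.2 then 1 else 0) + ((if k ∈ b.1 ++ b.2 then 1 else 0) + (if k ∈ c.1 ++ c.2 then 1 else 0)) := by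
    intro k
    simp only [List.count_append, count_set_mem]
  simp only [List.mem_toFinset, List.mem_filter, PySem.Set.mem_ofList, List.mem_append,
    PySem.Set.contains, Bool.and_eq_true, hcnt, List.contains_iff_mem]
  by_cases h1 : y ∈ a.1 ∨ y ∈ a.2 <;> by_cases h2 : y ∈ b.1 ∨ y ∈ b.2 <;>
    by_cases h3 : y ∈ c.1 ∨ y ∈ c.2 <;> simp_all

-- the main equality on lengths divisible by 3
-- A's per-index summand equals B's per-index summand, for indices the loop visits
lemma point_eq (data : List (List Int × List Int)) (h : data.length % 3 = 0)
    (x : Int) (hx : x ∈ PySem.List.pyRange 0 (PySem.List.len data) 3) :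
    (groupA (PySem.List.pyGetD data x ([], [])) (PySem.List.pyGetD data (x + 1) ([], []))
      (PySem.List.pyGetD data (x + 2) ([], []))).sum
    = groupB [PySem.List.pyGetD data x ([], []), PySem.List.pyGetD data (x + 1) ([], []),
        PySem.List.pyGetD data (x + 2) ([], [])] := by
  rw [PySem.List.len_eq] at hx
  obtain ⟨hx0, hxlt, hxdvd⟩ := (PySem.List.mem_pyRange_iff_of_pos (by norm_num) x).1 hx
  obtain ⟨j, rfl⟩ : ∃ j : Nat, x = (j : Int) := ⟨x.toNat, (Int.toNat_of_nonneg hx0).symm⟩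
  have hj3 : 3 ∣ j := by
    obtain ⟨t, ht⟩ := hxdvd
    exact ⟨t.toNat, by omega⟩
  have hjlt : j < data.length := by exact_mod_cast hxlt
  have hle : j + 3 ≤ data.length := by omega
  have g1 : PySem.List.pyGetD data (j : Int) ([], []) = data[j]'(by omega) := by
    rw [PySem.List.pyGetD_natCast, List.getD_eq_getElem _ _ (by omega)]
  have g2 : PySem.List.pyGetD data ((j : Int) + 1) ([], []) = data[j+1]'(by omega) := by
    rw [show ((j : Int) + 1) = ((j + 1 : Nat) : Int) by push_cast; ring,
        PySem.List.pyGetD_natCast, List.getD_eq_getElem _ _ (by omega)]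
  have g3 : PySem.List.pyGetD data ((j : Int) + 2) ([], []) = data[j+2]'(by omega) := by
    rw [show ((j : Int) + 2) = ((j + 2 : Nat) : Int) by push_cast; ring,
        PySem.List.pyGetD_natCast, List.getD_eq_getElem _ _ (by omega)]
  rw [g1, g2, g3]
  exact group_eq _ _ _

lemma main_eq (data : List (List Int × List Int)) (h : data.length % 3 = 0) :
    badge_priority data = badge_priority_alt data := by
  unfold badge_priority badge_priority_alt
  simp only [PySem.List.foldl_append_eq_flatMap, PySem.List.foldl_add, List.nil_append, zero_add,
    List.flatMap_def, List.sum_flatten, List.map_map]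
  apply congrArg
  apply List.map_congr_left
  intro x hx
  exact point_eq data h x hx

-- ===== VERDICT (by name: the statement is the Claim_ definition above) =====
theorem badge_priority_spec : Claim_equal_badge_priority := by
  intro data _ hpre
  unfold Spec_badge_priority
  exact main_eq data hpre
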